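-- pv_equiv track=rewrite | github.com/ayoubzulfiqar/Leetcode-Medium | FindtheScoreofAllPrefixesofanArray/find_the_score_of_all_prefixes_of_an_array.py | findThePrefixScores
-- ===== SOURCE A (Python) =====
-- def findThePrefixScores(nums: list[int]) -> list[int]:
--     n = len(nums)
--     ans = []
--     current_max = 0
--     current_score_sum = 0
--
--     for i in range(n):
--         current_max = max(current_max, nums[i])
--         conversion_value = nums[i] + current_max
--         current_score_sum += conversion_value
--         ans.append(current_score_sum)
--
--     return ans
-- ===== SOURCE B (Python) =====
-- def findThePrefixScores(nums: list[int]) -> list[int]: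
--     # Block decomposition: split the array at record-breaking elements (where the
--     # running max, clamped at 0, increases).  Inside each block the running max is
--     # a constant m, so scores are filled by the closed formula
--     #   ans[k] = total + sum(nums[i..k]) + m * (k - i + 1)
--     # with no per-element max computation.
--     n = len(nums)
--     ans = [0] * n
--     i = 0
--     m = 0
--     total = 0
--     while i < n:
--         if nums[i] > m:
--             m = nums[i]          # new record opens a block
--         j = i
--         while j < n and nums[j] <= m:
--             j += 1               # block [i, j): running max is m throughout
--         run = 0
--         for k in range(i, j):
--             run += nums[k]
--             ans[k] = total + run + m * (k - i + 1)
--         total = ans[j - 1]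
--         i = j
--     return ans
-- ===== Notes on version B (the rewrite author's own statement) =====
-- stated objective: alternative
-- what changed: Replaces A's single per-element loop (recomputing max and adding the conversion value each step) with a block decomposition: the array is split at record-breaking elements, and inside each block, where the running max is a constant m, scores are filled by the arithmetic formula total + running-block-sum + m*(offset+1), with no per-element max computation.
import Mathlib
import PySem

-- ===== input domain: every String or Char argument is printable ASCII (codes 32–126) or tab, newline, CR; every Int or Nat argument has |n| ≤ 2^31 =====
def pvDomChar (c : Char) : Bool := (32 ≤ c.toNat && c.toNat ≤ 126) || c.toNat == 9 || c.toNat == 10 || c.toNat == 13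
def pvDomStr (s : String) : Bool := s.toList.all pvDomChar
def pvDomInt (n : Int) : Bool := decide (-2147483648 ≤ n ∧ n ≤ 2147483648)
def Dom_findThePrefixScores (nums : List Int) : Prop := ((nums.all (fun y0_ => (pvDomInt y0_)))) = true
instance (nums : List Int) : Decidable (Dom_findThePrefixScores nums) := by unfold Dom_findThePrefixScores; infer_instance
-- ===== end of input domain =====

-- B replaces A's fused per-element max+sum loop with a block decomposition at record-breaking elements, filling each constant-max block by an arithmetic formula; same O(n) cost, alternative algorithm.


-- ===== PORT A =====
-- A: one loop maintaining (ans, current_max, current_score_sum); 'for i in range(n)'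
-- reading nums[i] in order is ported as a foldl over nums.
def findThePrefixScores (nums : List Int) : List Int :=
  (nums.foldl
    (fun (st : List Int × Int × Int) x =>
      let currentMax := max st.2.1 x
      let conversionValue := x + currentMax
      let currentScoreSum := st.2.2 + conversionValue
      (st.1 ++ [currentScoreSum], currentMax, currentScoreSum))
    ([], 0, 0)).1

-- ===== PORT B =====
-- inner 'for k in range(i, j)' filling one block: run accumulates nums[k],
-- cnt is (k - i + 1); emits total + run + m * cnt for each block element.
def pvFillBlock : List Int → Int → Int → Int → Int → List Int
  | [], _, _, _, _ => []
  | x :: xs, m, total, run, cnt =>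
      (total + (run + x) + m * cnt) :: pvFillBlock xs m total (run + x) (cnt + 1)

-- outer 'while i < n' loop over blocks: update m at the record element, take the
-- maximal block of elements ≤ m, fill it, continue after it with total = last of block.
-- fuel = remaining length makes the recursion structural (never exhausted on nums.length).
def pvScoresAux : Nat → List Int → Int → Int → List Int
  | 0, _, _, _ => []
  | _, [], _, _ => []
  | fuel + 1, x :: rest, m, total =>
      let m' := if x > m then x else m
      let blk := List.takeWhile (fun y => decide (y ≤ m')) (x :: rest)
      let rest' := List.dropWhile (fun y => decide (y ≤ m')) (x :: rest)
      pvFillBlock blk m' total 0 1 ++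
        pvScoresAux fuel rest' m' (total + blk.sum + m' * blk.length)

def findThePrefixScores_alt (nums : List Int) : List Int :=
  pvScoresAux nums.length nums 0 0

-- ===== PRECONDITION & SPEC =====
def Spec_findThePrefixScores (nums : List Int) (out : List Int) : Prop := out = findThePrefixScores_alt nums
instance (nums : List Int) (out : List Int) : Decidable (Spec_findThePrefixScores nums out) := by unfold Spec_findThePrefixScores; infer_instance

-- ===== CLAIM (what is proved, stated in full; the proofs are below) =====
def Claim_equal_findThePrefixScores : Prop := ∀ (nums : List Int), Dom_findThePrefixScores nums → Spec_findThePrefixScores nums (findThePrefixScores nums)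

-- ===== LEMMAS AND PROOFS =====
-- Reference recursion: the per-element score stream with running max m and sum s.
def pvA : List Int → Int → Int → List Int
  | [], _, _ => []
  | x :: xs, m, s => (s + x + max m x) :: pvA xs (max m x) (s + x + max m x)

theorem pvFoldA_eq (nums : List Int) : ∀ (m s : Int) (acc : List Int),
    (nums.foldl
      (fun (st : List Int × Int × Int) x =>
        let currentMax := max st.2.1 x
        let conversionValue := x + currentMax
        let currentScoreSum := st.2.2 + conversionValue
        (st.1 ++ [currentScoreSum], currentMax, currentScoreSum))
      (acc, m, s)).1 = acc ++ pvA nums m s := by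
  induction nums with
  | nil => intro m s acc; simp [pvA]
  | cons x xs ih =>
    intro m s acc
    simp only [List.foldl, pvA]
    rw [ih]
    have e : s + (x + max m x) = s + x + max m x := by ring
    simp only [e, List.append_assoc, List.singleton_append]

theorem pvFillBlock_eq (blk : List Int) (m : Int) :
    ∀ (total run cnt : Int), (∀ y ∈ blk, y ≤ m) →
    pvFillBlock blk m total run cnt = pvA blk m (total + run + m * (cnt - 1)) := by
  induction blk with
  | nil => intro _ _ _ _; simp [pvFillBlock, pvA]
  | cons x xs ih =>
    intro total run cnt h
    have hx : x ≤ m := h x (by simp)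
    have hmax : max m x = m := max_eq_left hx
    simp only [pvFillBlock, pvA, hmax]
    rw [ih total (run + x) (cnt + 1) (fun y hy => h y (by simp [hy]))]
    have e1 : total + (run + x) + m * cnt = total + run + m * (cnt - 1) + x + m := by ring
    have e2 : total + (run + x) + m * (cnt + 1 - 1) = total + run + m * (cnt - 1) + x + m := by ring
    rw [e1, e2]

theorem pvA_append (l1 : List Int) (m : Int) :
    ∀ (l2 : List Int) (s : Int), (∀ y ∈ l1, y ≤ m) →
    pvA (l1 ++ l2) m s = pvA l1 m s ++ pvA l2 m (s + l1.sum + m * l1.length) := by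
  induction l1 with
  | nil => intro l2 s _; simp [pvA]
  | cons x xs ih =>
    intro l2 s h
    have hx : x ≤ m := h x (by simp)
    have hmax : max m x = m := max_eq_left hx
    simp only [List.cons_append, pvA, hmax]
    rw [ih l2 (s + x + m) (fun y hy => h y (by simp [hy]))]
    congr 1
    simp only [List.length_cons, List.sum_cons]
    push_cast
    ring

theorem pvScoresAux_eq : ∀ (fuel : Nat) (xs : List Int) (m s : Int),
    xs.length ≤ fuel → pvScoresAux fuel xs m s = pvA xs m s := by
  intro fuel
  induction fuel with
  | zero =>
    intro xs m s h
    have : xs = [] := List.eq_nil_of_length_eq_zero (Nat.le_zero.mp h)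
    subst this; simp [pvScoresAux, pvA]
  | succ n ih =>
    intro xs m s h
    match xs with
    | [] => simp [pvScoresAux, pvA]
    | x :: rest =>
      simp only [pvScoresAux]
      set m' := if x > m then x else m with hm'
      have hmax : max m x = m' := by rw [hm']; split <;> omega
      have hxle : x ≤ m' := by rw [hm']; split <;> omega
      have htw : List.takeWhile (fun y => decide (y ≤ m')) (x :: rest)
          = x :: List.takeWhile (fun y => decide (y ≤ m')) rest := by
        simp [hxle]
      have hdw : List.dropWhile (fun y => decide (y ≤ m')) (x :: rest)
          = List.dropWhile (fun y => decide (y ≤ m')) rest := by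
        simp [hxle]
      set tw := List.takeWhile (fun y => decide (y ≤ m')) rest with htwdef
      set dw := List.dropWhile (fun y => decide (y ≤ m')) rest with hdwdef
      have htwle : ∀ y ∈ tw, y ≤ m' := by
        intro y hy
        have := List.mem_takeWhile_imp hy
        simpa using this
      have hsplit : rest = tw ++ dw := (List.takeWhile_append_dropWhile).symm
      have hdwlen : dw.length ≤ n := by
        have h1 : tw.length + dw.length = rest.length := by
          rw [hsplit, List.length_append]
        have h2 : rest.length ≤ n := by simpa using Nat.succ_le_succ_iff.mp h
        omega
      rw [htw, hdw]
      -- expand one step of pvA on the A side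
      have hA : pvA (x :: rest) m s
          = (s + x + m') :: pvA (tw ++ dw) m' (s + x + m') := by
        simp only [pvA, hmax]
        rw [← hsplit]
      rw [hA, pvA_append tw m' dw (s + x + m') htwle]
      -- expand the B side block fill
      simp only [pvFillBlock]
      rw [pvFillBlock_eq tw m' s (0 + x) (1 + 1) htwle, ih dw m' _ hdwlen]
      have e1 : s + (0 + x) + m' * 1 = s + x + m' := by ring
      have e2 : s + (0 + x) + m' * (1 + 1 - 1) = s + x + m' := by ring
      have e3 : s + (x :: tw).sum + m' * ((x :: tw).length : Int) = s + x + m' + tw.sum + m' * (tw.length : Int) := by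
        simp only [List.sum_cons, List.length_cons]; push_cast; ring
      rw [e1, e2, e3]
      simp [List.cons_append]

-- ===== VERDICT (by name: the statement is the Claim_ definition above) =====
theorem findThePrefixScores_spec : Claim_equal_findThePrefixScores := by
  intro nums _
  show findThePrefixScores nums = findThePrefixScores_alt nums
  unfold findThePrefixScores findThePrefixScores_alt
  rw [pvFoldA_eq nums 0 0 [], pvScoresAux_eq nums.length nums 0 0 le_rfl]
  simp
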